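-- pv_equiv track=rewrite | github.com/dvh549/Social_Analytics | WebApp/backend/getData.py | filter_chars
-- ===== SOURCE A (Python) =====
-- def filter_chars(a):
--     sent = []
--     for word in a.split(' '):
--         if ('$' in word) | ('&' in word):
--             sent.append('')
--         else:
--             sent.append(word)
--     return ' '.join(sent)
-- ===== SOURCE B (Python) =====
-- def filter_chars(a):
--     # Single streaming pass: no word list is built; a token buffer is flushed
--     # at each space (blanked if it contained '$' or '&').
--     out = []
--     buf = []
--     bad = False
--     for ch in a:
--         if ch == ' ':
--             out.append('' if bad else ''.join(buf))
--             out.append(' ')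
--             buf = []
--             bad = False
--         else:
--             buf.append(ch)
--             if ch == '$' or ch == '&':
--                 bad = True
--     out.append('' if bad else ''.join(buf))
--     return ''.join(out)
-- ===== Notes on version B (the rewrite author's own statement) =====
-- stated objective: alternative
-- what changed: Replaces split-into-word-list / per-word test / join with a single streaming pass over the characters that keeps only a token buffer and a taint flag, flushing at each space.
import Mathlib
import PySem

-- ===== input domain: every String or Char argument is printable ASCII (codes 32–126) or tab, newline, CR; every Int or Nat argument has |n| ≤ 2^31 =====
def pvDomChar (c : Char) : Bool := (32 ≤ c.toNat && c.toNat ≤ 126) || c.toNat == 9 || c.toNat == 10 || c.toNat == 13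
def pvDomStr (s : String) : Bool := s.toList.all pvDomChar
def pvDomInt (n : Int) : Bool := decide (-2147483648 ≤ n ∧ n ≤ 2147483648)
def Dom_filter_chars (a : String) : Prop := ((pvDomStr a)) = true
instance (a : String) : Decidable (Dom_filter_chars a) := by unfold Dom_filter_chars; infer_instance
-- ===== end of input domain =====

-- B replaces A's split/per-word-test/join with a single streaming pass keeping a token buffer and a taint flag (alternative decomposition, same cost).

-- ===== PORT A =====
def filter_chars (a : String) : String :=
  String.ofList (PySem.Chars.join [' ']
    ((PySem.Chars.splitOn a.toList [' ']).foldl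
      (fun sent word =>
        if PySem.Chars.isIn ['$'] word || PySem.Chars.isIn ['&'] word then
          sent ++ [([] : List Char)]
        else
          sent ++ [word]) []))

-- ===== PORT B =====
-- one step of B's streaming loop and the final flush of the buffer
def pvStep (st : List Char × List Char × Bool) (ch : Char) : List Char × List Char × Bool :=
  if ch = ' ' then
    (st.1 ++ (if st.2.2 then [] else st.2.1) ++ [' '], [], false)
  else
    (st.1, st.2.1 ++ [ch], st.2.2 || (ch == '$' || ch == '&'))

def pvFlush (st : List Char × List Char × Bool) : List Char :=
  st.1 ++ (if st.2.2 then [] else st.2.1)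

def filter_chars_alt (a : String) : String :=
  String.ofList (pvFlush (a.toList.foldl pvStep ([], [], false)))

-- ===== PRECONDITION & SPEC =====
def Spec_filter_chars (a : String) (out : String) : Prop := out = filter_chars_alt a
instance (a : String) (out : String) : Decidable (Spec_filter_chars a out) := by unfold Spec_filter_chars; infer_instance

-- ===== CLAIM (what is proved, stated in full; the proofs are below) =====
def Claim_equal_filter_chars : Prop := ∀ (a : String), Dom_filter_chars a → Spec_filter_chars a (filter_chars a)

-- ===== LEMMAS AND PROOFS =====

-- simple recursive characterisation of split on a single space
def pvMapHead (f : List Char → List Char) : List (List Char) → List (List Char)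
  | [] => []
  | h :: t => f h :: t

def pvSplit : List Char → List (List Char)
  | [] => [[]]
  | c :: rest => if c = ' ' then [] :: pvSplit rest else pvMapHead (fun w => c :: w) (pvSplit rest)

def pvBad (w : List Char) : Bool := PySem.Chars.isIn ['$'] w || PySem.Chars.isIn ['&'] w

def pvBlank (w : List Char) : List Char := if pvBad w then [] else w

lemma pvSplit_ne_nil (l : List Char) : pvSplit l ≠ [] := by
  induction l with
  | nil => simp [pvSplit]
  | cons c rest ih =>
    simp only [pvSplit]
    split
    · simp
    · cases h : pvSplit rest with
      | nil => exact absurd h ih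
      | cons a t => simp [pvMapHead]

lemma isIn_singleton (c : Char) (w : List Char) :
    PySem.Chars.isIn [c] w = w.contains c := by
  by_cases h : c ∈ w
  · have : [c] <:+: w := by
      obtain ⟨s, t, rfl⟩ := List.append_of_mem h
      exact ⟨s, t, by simp⟩
    simp [(PySem.Chars.isIn_iff_infix _ _).mpr this, h]
  · have : ¬ ([c] <:+: w) := fun hin => h (hin.subset (by simp))
    simp [(PySem.Chars.isIn_eq_false_iff _ _).mpr this, h]

lemma pvBad_nil : pvBad [] = false := by simp [pvBad, isIn_singleton]

lemma pvBad_cons (c : Char) (h : List Char) :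
    pvBad (c :: h) = ((c == '$' || c == '&') || pvBad h) := by
  simp only [pvBad, isIn_singleton, List.contains_cons]
  rw [show ('$' == c) = (c == '$') from by simp [BEq.comm],
      show ('&' == c) = (c == '&') from by simp [BEq.comm]]
  cases c == '$' <;> cases c == '&' <;> simp [Bool.or_comm]

lemma go_space : ∀ (fuel : Nat) (l cur : List Char) (acc : List (List Char)),
    l.length ≤ fuel →
    PySem.Chars.splitOn.go [' '] fuel l cur acc
      = acc.reverse ++ pvMapHead (fun w => cur.reverse ++ w) (pvSplit l) := by
  intro fuel
  induction fuel with
  | zero =>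
    intro l cur acc hl
    have : l = [] := List.length_eq_zero_iff.mp (Nat.le_zero.mp hl)
    subst this
    simp [PySem.Chars.splitOn.go, pvSplit, pvMapHead]
  | succ f ih =>
    intro l cur acc hl
    cases l with
    | nil => simp [PySem.Chars.splitOn.go, pvSplit, pvMapHead]
    | cons c rest =>
      by_cases hc : c = ' '
      · subst hc
        have hpre : List.isPrefixOf [' '] (' ' :: rest) = true := by
          simp [List.isPrefixOf]
        rw [show PySem.Chars.splitOn.go [' '] (f+1) (' ' :: rest) cur acc
              = PySem.Chars.splitOn.go [' '] f (List.drop 1 (' ' :: rest)) [] (cur.reverse :: acc) by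
              simp [PySem.Chars.splitOn.go, hpre]]
        rw [ih _ _ _ (by simpa using Nat.le_of_succ_le_succ hl)]
        simp only [List.drop_one, List.tail_cons, pvSplit, reduceIte]
        cases hs : pvSplit rest with
        | nil => exact absurd hs (pvSplit_ne_nil rest)
        | cons h t => simp [pvMapHead]
      · have hpre : List.isPrefixOf [' '] (c :: rest) = false := by
          simp [List.isPrefixOf]
          exact fun h => hc h.symm
        rw [show PySem.Chars.splitOn.go [' '] (f+1) (c :: rest) cur acc
              = PySem.Chars.splitOn.go [' '] f rest (c :: cur) acc by
              simp [PySem.Chars.splitOn.go, hpre]]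
        rw [ih _ _ _ (by simpa using Nat.le_of_succ_le_succ hl)]
        simp only [pvSplit, if_neg hc]
        cases hs : pvSplit rest with
        | nil => exact absurd hs (pvSplit_ne_nil rest)
        | cons h t => simp [pvMapHead]

lemma splitOn_space (l : List Char) :
    PySem.Chars.splitOn l [' '] = pvSplit l := by
  rw [PySem.Chars.splitOn, go_space (l.length + 1) l [] [] (Nat.le_succ _)]
  cases hs : pvSplit l with
  | nil => exact absurd hs (pvSplit_ne_nil l)
  | cons h t => simp [pvMapHead]

lemma foldl_append_blank (ws : List (List Char)) :
    ∀ (acc : List (List Char)),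
    ws.foldl (fun sent word =>
        if PySem.Chars.isIn ['$'] word || PySem.Chars.isIn ['&'] word then
          sent ++ [([] : List Char)]
        else sent ++ [word]) acc
      = acc ++ ws.map pvBlank := by
  induction ws with
  | nil => simp
  | cons w t ih =>
    intro acc
    simp only [List.foldl_cons, List.map_cons]
    rw [ih]
    by_cases h : pvBad w = true
    · simp only [pvBad] at h
      simp [pvBlank, pvBad, h]
    · have h' : (PySem.Chars.isIn ['$'] w || PySem.Chars.isIn ['&'] w) = false := by
        simpa [pvBad] using h
      simp [pvBlank, pvBad, h']

-- the value A computes for the remaining input l, given a pending buffer and taint flag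
def pvRend (l : List Char) (buf : List Char) (bad : Bool) : List Char :=
  match pvSplit l with
  | [] => []
  | h :: t =>
    PySem.Chars.join [' ']
      ((if bad || pvBad h then [] else buf ++ h) :: t.map pvBlank)

lemma key : ∀ (l out buf : List Char) (bad : Bool),
    pvFlush (l.foldl pvStep (out, buf, bad)) = out ++ pvRend l buf bad := by
  intro l
  induction l with
  | nil =>
    intro out buf bad
    simp only [List.foldl_nil, pvFlush, pvRend, pvSplit, pvBad_nil, Bool.or_false,
      PySem.Chars.join, List.intercalate]
    cases bad <;> simp
  | cons c rest ih =>
    intro out buf bad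
    by_cases hc : c = ' '
    · subst hc
      simp only [List.foldl_cons, pvStep, reduceIte]
      rw [ih]
      simp only [pvRend, pvSplit, reduceIte]
      cases hs : pvSplit rest with
      | nil => exact absurd hs (pvSplit_ne_nil rest)
      | cons h t =>
        simp only [PySem.Chars.join, List.intercalate, List.map_cons]
        have h1 : (if (false || pvBad h) = true then ([] : List Char) else [] ++ h) = pvBlank h := by
          simp [pvBlank]
        rw [h1]
        cases bad <;> simp [pvBad_nil]
    · simp only [List.foldl_cons, pvStep, if_neg hc]
      rw [ih]
      simp only [pvRend, pvSplit, if_neg hc]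
      cases hs : pvSplit rest with
      | nil => exact absurd hs (pvSplit_ne_nil rest)
      | cons h t =>
        simp only [pvMapHead, pvBad_cons]
        have hb : ((bad || (c == '$' || c == '&')) || pvBad h)
            = (bad || ((c == '$' || c == '&') || pvBad h)) := by
          cases bad <;> simp [Bool.or_assoc]
        rw [hb]
        have h2 : buf ++ [c] ++ h = buf ++ c :: h := by simp
        rw [h2]

lemma pvRend_nil_false (l : List Char) :
    pvRend l [] false = PySem.Chars.join [' '] ((pvSplit l).map pvBlank) := by
  unfold pvRend
  cases hs : pvSplit l with
  | nil => exact absurd hs (pvSplit_ne_nil l)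
  | cons h t => simp [pvBlank]

-- ===== VERDICT (by name: the statement is the Claim_ definition above) =====
theorem filter_chars_spec : Claim_equal_filter_chars := by
  intro a _
  show filter_chars a = filter_chars_alt a
  unfold filter_chars filter_chars_alt
  rw [splitOn_space, foldl_append_blank, key, pvRend_nil_false]
  simp
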